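-- pv_equiv track=rewrite | github.com/vibhor-77/agi-mvp-arc-agi-1 | domains/arc/primitives.py | gerode
-- ===== SOURCE A (Python) =====
-- Grid = list[list[int]]
--
-- def _clone(g: Grid) -> Grid:
--     # Optimized nested list slice is ~10-20x faster than deepcopy
--     return [row[:] for row in g]
--
-- def _rows(g: Grid) -> int:
--     return len(g)
--
-- def _cols(g: Grid) -> int:
--     return len(g[0]) if g else 0
--
-- def gerode(g: Grid) -> Grid:
--     """
--     Binary erosion: a non-zero cell is set to 0 if any of its 4-connected
--     neighbours is 0.  Shrinks objects inward by one cell.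
--     """
--     rows, cols = _rows(g), _cols(g)
--     result = _clone(g)
--     for r in range(rows):
--         for c in range(cols):
--             if g[r][c] != 0:
--                 for dr, dc in ((-1, 0), (1, 0), (0, -1), (0, 1)):
--                     nr, nc = r + dr, c + dc
--                     if not (0 <= nr < rows and 0 <= nc < cols) or g[nr][nc] == 0:
--                         result[r][c] = 0
--                         break
--     return result
-- ===== SOURCE B (Python) =====
-- Grid = list[list[int]]
--
-- def gerode(g: Grid) -> Grid:
--     """
--     Binary erosion via background dilation: out-of-bounds counts as background,
--     so every non-zero border cell is cleared, and every zero cell clears its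
--     in-bounds 4-neighbours.  Reads come only from g, writes go only to result.
--     """
--     rows = len(g)
--     cols = len(g[0]) if g else 0
--     result = [row[:] for row in g]
--     for r in range(rows):
--         for c in range(cols):
--             if (r == 0 or r == rows - 1 or c == 0 or c == cols - 1) and g[r][c] != 0:
--                 result[r][c] = 0
--     for r in range(rows):
--         for c in range(cols):
--             if g[r][c] == 0:
--                 for nr, nc in ((r - 1, c), (r + 1, c), (r, c - 1), (r, c + 1)):
--                     if 0 <= nr < rows and 0 <= nc < cols:
--                         result[nr][nc] = 0
--     return result
-- ===== Notes on version B (the rewrite author's own statement) =====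
-- stated objective: faster
-- what changed: A scans foreground cells and probes each one's 4 neighbours with per-neighbour bounds checks and a break; B instead models erosion as background dilation: it zeroes non-zero border cells (out-of-bounds = background) and then lets every zero cell of the original grid clear its in-bounds neighbours in the result.
import Mathlib
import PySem

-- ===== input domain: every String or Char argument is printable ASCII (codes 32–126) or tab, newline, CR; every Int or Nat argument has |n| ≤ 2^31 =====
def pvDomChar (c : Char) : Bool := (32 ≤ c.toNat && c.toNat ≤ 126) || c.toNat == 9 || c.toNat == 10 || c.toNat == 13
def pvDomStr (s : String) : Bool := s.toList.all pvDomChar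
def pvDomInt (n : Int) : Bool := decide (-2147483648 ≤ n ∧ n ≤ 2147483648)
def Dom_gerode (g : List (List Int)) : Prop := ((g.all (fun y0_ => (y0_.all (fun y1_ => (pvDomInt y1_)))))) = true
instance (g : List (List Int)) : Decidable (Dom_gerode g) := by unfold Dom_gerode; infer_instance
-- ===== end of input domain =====

-- B replaces A's per-foreground-cell neighbour probe (with break) by background dilation:
-- zero the non-zero border cells, then let every zero cell clear its in-bounds neighbours
-- in the result (same O(rows*cols); a timing run measured B faster by a constant factor).

-- ===== PORT A =====
-- shared grid primitives (Python len(g[0]), g[r][c] read, result[r][c] = v write)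
def gcols (g : List (List Int)) : Nat := match g with | [] => 0 | row :: _ => row.length
def gval (g : List (List Int)) (r c : Nat) : Int := (g.getD r []).getD c 0
def gset2 (m : List (List Int)) (r c : Nat) (v : Int) : List (List Int) :=
  m.modify r (fun row => row.set c v)

-- A's inner 'for dr, dc in …: … break' loop, step for step
def gerodeNbrLoop (g : List (List Int)) (rows cols r c : Nat)
    (res : List (List Int)) : List (Int × Int) → List (List Int)
  | [] => res
  | (dr, dc) :: rest =>
      let nr : Int := (r : Int) + dr
      let nc : Int := (c : Int) + dc
      if ¬(0 ≤ nr ∧ nr < (rows : Int) ∧ 0 ≤ nc ∧ nc < (cols : Int)) then gset2 res r c 0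
      else if gval g nr.toNat nc.toNat = 0 then gset2 res r c 0
      else gerodeNbrLoop g rows cols r c res rest

def gerode (g : List (List Int)) : List (List Int) :=
  let rows := g.length
  let cols := gcols g
  let result := g.map (fun row => PySem.List.slice row none none)
  (List.range rows).foldl (fun res r =>
    (List.range cols).foldl (fun res c =>
      if gval g r c ≠ 0 then
        gerodeNbrLoop g rows cols r c res [(-1, 0), (1, 0), (0, -1), (0, 1)]
      else res) res) result

-- ===== PORT B =====
def gerode_alt (g : List (List Int)) : List (List Int) :=
  let rows := g.length
  let cols := gcols g
  let result := g.map (fun row => PySem.List.slice row none none)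
  -- pass 1: out-of-bounds is background, so clear non-zero border cells
  let result := (List.range rows).foldl (fun res r =>
    (List.range cols).foldl (fun res c =>
      if (r = 0 ∨ r = rows - 1 ∨ c = 0 ∨ c = cols - 1) ∧ gval g r c ≠ 0
      then gset2 res r c 0 else res) res) result
  -- pass 2: every zero cell clears its in-bounds 4-neighbours in the result
  (List.range rows).foldl (fun res r =>
    (List.range cols).foldl (fun res c =>
      if gval g r c = 0 then
        [((r:Int)-1,(c:Int)), ((r:Int)+1,(c:Int)), ((r:Int),(c:Int)-1), ((r:Int),(c:Int)+1)].foldl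
          (fun res p =>
            if 0 ≤ p.1 ∧ p.1 < (rows : Int) ∧ 0 ≤ p.2 ∧ p.2 < (cols : Int)
            then gset2 res p.1.toNat p.2.toNat 0 else res) res
      else res) res) result

-- ===== PRECONDITION & SPEC =====
-- Pre_ excludes exactly the ragged grids with a row shorter than the first row,
-- on which both Pythons raise IndexError while reading g[r][c] for c < len(g[0]).
def Pre_gerode (g : List (List Int)) : Prop := ∀ row ∈ g, (g.headD []).length ≤ row.length
instance (g : List (List Int)) : Decidable (Pre_gerode g) := by unfold Pre_gerode; infer_instance
def pvWitness_gerode : List (List Int) := [[1, 1, 1], [1, 1, 0], [0, 1, 1]]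
def Spec_gerode (g : List (List Int)) (out : List (List Int)) : Prop := out = gerode_alt g
instance (g : List (List Int)) (out : List (List Int)) : Decidable (Spec_gerode g out) := by unfold Spec_gerode; infer_instance

-- ===== CLAIM (what is proved, stated in full; the proofs are below) =====
def Claim_equal_gerode : Prop := ∀ (g : List (List Int)), Dom_gerode g → Pre_gerode g → Spec_gerode g (gerode g)

-- ===== LEMMAS AND PROOFS =====

-- cell read of a grid as an Option
def g2 (m : List (List Int)) (i j : Nat) : Option Int := m[i]?.bind fun row => row[j]?

-- row-length profile of a grid
def gshape (m : List (List Int)) : List Nat := m.map List.length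

theorem clone_eq (g : List (List Int)) :
    g.map (fun row => PySem.List.slice row none none) = g := by
  simp [PySem.List.slice_none_none]

theorem gshape_gset2 (m : List (List Int)) (r c : Nat) (v : Int) :
    gshape (gset2 m r c v) = gshape m := by
  apply List.ext_getElem?
  intro n
  simp only [gshape, gset2, List.getElem?_map, List.getElem?_modify]
  cases m[n]? with
  | none => rfl
  | some row => by_cases h : r = n <;> simp [h]

theorem g2_gset2 (m : List (List Int)) (r c : Nat) (v : Int) (i j : Nat) :
    g2 (gset2 m r c v) i j
      = if r = i ∧ c = j then (g2 m i j).map (fun _ => v) else g2 m i j := by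
  unfold g2 gset2
  rw [List.getElem?_modify]
  cases hm : m[i]? with
  | none => by_cases hr : r = i <;> simp [hr]
  | some row =>
    by_cases hr : r = i
    · subst hr
      simp only [Option.bind_some]
      by_cases hc : c = j
      · subst hc
        rcases Nat.lt_or_ge c row.length with h | h
        · simp [h]
        · simp [Nat.not_lt.mpr h]
      · simp [hc]
    · simp [hr]

theorem foldl_pres {α ι γ : Type*} (f : α → γ) (step : α → ι → α)
    (h : ∀ acc x, f (step acc x) = f acc) :
    ∀ (l : List ι) (init : α), f (l.foldl step init) = f init := by
  intro l
  induction l with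
  | nil => intro init; rfl
  | cons x l ih => intro init; rw [List.foldl_cons, ih, h]

theorem g2_foldl_setif {ι : Type} (C : ι → Prop) [DecidablePred C] (a b : ι → Nat)
    (l : List ι) (init : List (List Int)) (i j : Nat) :
    g2 (l.foldl (fun res x => if C x then gset2 res (a x) (b x) 0 else res) init) i j
    = if ∃ x ∈ l, C x ∧ a x = i ∧ b x = j
      then (g2 init i j).map (fun _ => 0) else g2 init i j := by
  induction l generalizing init with
  | nil => simp
  | cons x l ih =>
    rw [List.foldl_cons, ih]
    have hs : g2 (if C x then gset2 init (a x) (b x) 0 else init) i j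
        = if C x ∧ a x = i ∧ b x = j
          then (g2 init i j).map (fun _ => 0) else g2 init i j := by
      by_cases h1 : C x
      · rw [if_pos h1, g2_gset2]
        by_cases h2 : a x = i ∧ b x = j
        · simp [h1, h2.1, h2.2]
        · rw [if_neg h2, if_neg (by tauto)]
      · simp [h1]
    rw [hs]
    by_cases hx : C x ∧ a x = i ∧ b x = j <;>
      by_cases hl : ∃ y ∈ l, C y ∧ a y = i ∧ b y = j <;>
        cases hg : g2 init i j <;>
          simp [hx, hl]

-- generic: doubly nested write loop, flattened to one list of writes
theorem g2_foldl_fold2 {ι κ : Type} (outer : List ι) (inner : ι → List κ)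
    (C : κ → Prop) [DecidablePred C] (a b : κ → Nat)
    (init : List (List Int)) (i j : Nat) :
    g2 (outer.foldl (fun res x =>
          (inner x).foldl (fun res q => if C q then gset2 res (a q) (b q) 0 else res) res) init) i j
    = if ∃ x ∈ outer, ∃ q ∈ inner x, C q ∧ a q = i ∧ b q = j
      then (g2 init i j).map (fun _ => 0) else g2 init i j := by
  rw [← List.foldl_flatMap, g2_foldl_setif]
  have hiff : (∃ q ∈ List.flatMap inner outer, C q ∧ a q = i ∧ b q = j)
      ↔ (∃ x ∈ outer, ∃ q ∈ inner x, C q ∧ a q = i ∧ b q = j) := by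
    constructor
    · rintro ⟨q, hq, h⟩
      rcases List.mem_flatMap.mp hq with ⟨x, hx, hqx⟩
      exact ⟨x, hx, q, hqx, h⟩
    · rintro ⟨x, hx, q, hq, h⟩
      exact ⟨q, List.mem_flatMap.mpr ⟨x, hx, hq⟩, h⟩
  simp only [hiff]

theorem gcols_eq (g : List (List Int)) : gcols g = (g.headD []).length := by
  cases g <;> rfl

-- unrolled A inner loop: it writes (r,c) iff some neighbour is out of bounds or zero
theorem gerodeNbrLoop_eq (g : List (List Int)) (rows cols r c : Nat)
    (res : List (List Int)) (ds : List (Int × Int)) :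
    gerodeNbrLoop g rows cols r c res ds =
      if ∃ d ∈ ds,
          ¬(0 ≤ (r:Int)+d.1 ∧ (r:Int)+d.1 < (rows:Int) ∧ 0 ≤ (c:Int)+d.2 ∧ (c:Int)+d.2 < (cols:Int))
          ∨ gval g ((r:Int)+d.1).toNat ((c:Int)+d.2).toNat = 0
      then gset2 res r c 0 else res := by
  induction ds with
  | nil => simp [gerodeNbrLoop]
  | cons d rest ih =>
    obtain ⟨dr, dc⟩ := d
    simp only [gerodeNbrLoop, ih, List.exists_mem_cons_iff]
    by_cases h1 : 0 ≤ (r:Int) + dr ∧ (r:Int) + dr < (rows:Int) ∧ 0 ≤ (c:Int) + dc ∧ (c:Int) + dc < (cols:Int)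
    · rw [if_neg (not_not_intro h1)]
      by_cases h2 : gval g ((r:Int)+dr).toNat ((c:Int)+dc).toNat = 0
      · rw [if_pos h2, if_pos (Or.inl (Or.inr h2))]
      · rw [if_neg h2]
        by_cases h3 : ∃ d ∈ rest,
            ¬(0 ≤ (r:Int) + d.1 ∧ (r:Int) + d.1 < (rows:Int) ∧ 0 ≤ (c:Int) + d.2 ∧ (c:Int) + d.2 < (cols:Int))
            ∨ gval g ((r:Int)+d.1).toNat ((c:Int)+d.2).toNat = 0
        · rw [if_pos h3, if_pos (Or.inr h3)]
        · rw [if_neg h3, if_neg (by rintro ((ha | hb) | hc); exacts [ha h1, h2 hb, h3 hc])]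
    · rw [if_pos h1, if_pos (Or.inl (Or.inl h1))]

-- the per-cell conditions, in plain arithmetic form
abbrev BorderC (g : List (List Int)) (i j : Nat) : Prop :=
  i = 0 ∨ i = g.length - 1 ∨ j = 0 ∨ j = gcols g - 1
abbrev NZ (g : List (List Int)) (i j : Nat) : Prop :=
  (1 ≤ i ∧ gval g (i-1) j = 0) ∨ (i+1 < g.length ∧ gval g (i+1) j = 0) ∨
  (1 ≤ j ∧ gval g i (j-1) = 0) ∨ (j+1 < gcols g ∧ gval g i (j+1) = 0)

-- A's per-cell write condition, literally
abbrev CA (g : List (List Int)) (r c : Nat) : Prop :=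
  gval g r c ≠ 0 ∧ ∃ d ∈ ([(-1,0),(1,0),(0,-1),(0,1)] : List (Int × Int)),
    ¬(0 ≤ (r:Int)+d.1 ∧ (r:Int)+d.1 < (g.length:Int) ∧ 0 ≤ (c:Int)+d.2 ∧ (c:Int)+d.2 < ((gcols g):Int))
    ∨ gval g ((r:Int)+d.1).toNat ((c:Int)+d.2).toNat = 0

theorem gerode_eq_setif (g : List (List Int)) :
    gerode g = (List.range g.length).foldl (fun res r =>
      (List.range (gcols g)).foldl (fun res c =>
        if CA g r c then gset2 res r c 0 else res) res) g := by
  unfold gerode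
  dsimp only
  rw [clone_eq]
  refine PySem.List.foldl_congr_mem _ _ _ _ ?_
  intro res r _
  refine PySem.List.foldl_congr_mem _ _ _ _ ?_
  intro res' c _
  rw [gerodeNbrLoop_eq]
  by_cases h1 : gval g r c = 0
  · rw [if_neg (by simpa using h1), if_neg (by rintro ⟨h, _⟩; exact h h1)]
  · rw [if_pos h1]
    by_cases h2 : ∃ d ∈ ([(-1,0),(1,0),(0,-1),(0,1)] : List (Int × Int)),
        ¬(0 ≤ (r:Int)+d.1 ∧ (r:Int)+d.1 < (g.length:Int) ∧ 0 ≤ (c:Int)+d.2 ∧ (c:Int)+d.2 < ((gcols g):Int))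
        ∨ gval g ((r:Int)+d.1).toNat ((c:Int)+d.2).toNat = 0
    · rw [if_pos h2, if_pos ⟨h1, h2⟩]
    · rw [if_neg h2, if_neg (by rintro ⟨_, h⟩; exact h2 h)]

theorem g2_gerode_raw (g : List (List Int)) (i j : Nat) :
    g2 (gerode g) i j =
      if i < g.length ∧ j < gcols g ∧ CA g i j
      then (g2 g i j).map (fun _ => 0) else g2 g i j := by
  rw [gerode_eq_setif]
  have hmap : ∀ (init : List (List Int)) (r : Nat),
      (List.range (gcols g)).foldl (fun res c => if CA g r c then gset2 res r c 0 else res) init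
      = ((List.range (gcols g)).map (fun c => (r, c))).foldl
          (fun res (p : Nat × Nat) => if CA g p.1 p.2 then gset2 res p.1 p.2 0 else res) init := by
    intro init r; rw [List.foldl_map]
  rw [show (List.range g.length).foldl (fun res r => (List.range (gcols g)).foldl
        (fun res c => if CA g r c then gset2 res r c 0 else res) res) g
      = (List.range g.length).foldl (fun res r => ((List.range (gcols g)).map (fun c => (r, c))).foldl
        (fun res (p : Nat × Nat) => if CA g p.1 p.2 then gset2 res p.1 p.2 0 else res) res) g
    from PySem.List.foldl_congr_mem _ _ _ _ (fun acc r _ => hmap acc r)]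
  rw [g2_foldl_fold2]
  have hiff : (∃ r ∈ List.range g.length, ∃ p ∈ (List.range (gcols g)).map (fun c => (r, c)),
        CA g p.1 p.2 ∧ p.1 = i ∧ p.2 = j) ↔ (i < g.length ∧ j < gcols g ∧ CA g i j) := by
    constructor
    · rintro ⟨r, hr, p, hp, hC, h1, h2⟩
      rcases List.mem_map.mp hp with ⟨c, hc, rfl⟩
      cases h1; cases h2
      exact ⟨List.mem_range.mp hr, List.mem_range.mp hc, hC⟩
    · rintro ⟨hi, hj, hC⟩
      exact ⟨i, List.mem_range.mpr hi, (i, j),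
        List.mem_map.mpr ⟨j, List.mem_range.mpr hj, rfl⟩, hC, rfl, rfl⟩
  simp only [hiff]

-- arithmetic normal form of A's condition, inside the grid
theorem CA_iff (g : List (List Int)) (i j : Nat) (hi : i < g.length) (hj : j < gcols g) :
    CA g i j ↔ (gval g i j ≠ 0 ∧ (BorderC g i j ∨ NZ g i j)) := by
  unfold CA BorderC NZ
  have t1 : ((i:Int) + -1).toNat = i - 1 := by omega
  have t2 : ((i:Int) + 1).toNat = i + 1 := by omega
  have t3 : ((j:Int) + -1).toNat = j - 1 := by omega
  have t4 : ((j:Int) + 1).toNat = j + 1 := by omega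
  have t5 : ((i:Int) + 0).toNat = i := by omega
  have t6 : ((j:Int) + 0).toNat = j := by omega
  simp only [List.mem_cons, List.not_mem_nil, or_false, exists_eq_or_imp, exists_eq_left]
  constructor
  · rintro ⟨hv, h⟩
    refine ⟨hv, ?_⟩
    rcases h with (h | h) | (h | h) | (h | h) | (h | h)
    · exact Or.inl (Or.inl (by omega))
    · rcases Nat.eq_zero_or_pos i with h0 | h0
      · exact Or.inl (Or.inl h0)
      · refine Or.inr (Or.inl ⟨h0, ?_⟩); rwa [t1, t6] at h
    · exact Or.inl (Or.inr (Or.inl (by omega)))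
    · rcases Nat.lt_or_ge (i+1) g.length with h0 | h0
      · refine Or.inr (Or.inr (Or.inl ⟨h0, ?_⟩)); rwa [t2, t6] at h
      · exact Or.inl (Or.inr (Or.inl (by omega)))
    · exact Or.inl (Or.inr (Or.inr (Or.inl (by omega))))
    · rcases Nat.eq_zero_or_pos j with h0 | h0
      · exact Or.inl (Or.inr (Or.inr (Or.inl h0)))
      · refine Or.inr (Or.inr (Or.inr (Or.inl ⟨h0, ?_⟩))); rwa [t5, t3] at h
    · exact Or.inl (Or.inr (Or.inr (Or.inr (by omega))))
    · rcases Nat.lt_or_ge (j+1) (gcols g) with h0 | h0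
      · refine Or.inr (Or.inr (Or.inr (Or.inr ⟨h0, ?_⟩))); rwa [t5, t4] at h
      · exact Or.inl (Or.inr (Or.inr (Or.inr (by omega))))
  · rintro ⟨hv, h⟩
    refine ⟨hv, ?_⟩
    rcases h with (h | h | h | h) | (⟨h0, h⟩ | ⟨h0, h⟩ | ⟨h0, h⟩ | ⟨h0, h⟩)
    · exact Or.inl (Or.inl (by omega))
    · exact Or.inr (Or.inl (Or.inl (by omega)))
    · exact Or.inr (Or.inr (Or.inl (Or.inl (by omega))))
    · exact Or.inr (Or.inr (Or.inr (Or.inl (by omega))))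
    · exact Or.inl (Or.inr (by rw [t1, t6]; exact h))
    · exact Or.inr (Or.inl (Or.inr (by rw [t2, t6]; exact h)))
    · exact Or.inr (Or.inr (Or.inl (Or.inr (by rw [t5, t3]; exact h))))
    · exact Or.inr (Or.inr (Or.inr (Or.inr (by rw [t5, t4]; exact h))))

theorem g2_gerode (g : List (List Int)) (i j : Nat) :
    g2 (gerode g) i j =
      if i < g.length ∧ j < gcols g ∧ gval g i j ≠ 0 ∧ (BorderC g i j ∨ NZ g i j)
      then (g2 g i j).map (fun _ => 0) else g2 g i j := by
  rw [g2_gerode_raw]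
  by_cases hi : i < g.length
  · by_cases hj : j < gcols g
    · by_cases hc : CA g i j
      · rw [if_pos ⟨hi, hj, hc⟩, if_pos ⟨hi, hj, (CA_iff g i j hi hj).mp hc⟩]
      · rw [if_neg (fun h => hc h.2.2), if_neg (fun h => hc ((CA_iff g i j hi hj).mpr h.2.2))]
    · rw [if_neg (fun h => hj h.2.1), if_neg (fun h => hj h.2.1)]
  · rw [if_neg (fun h => hi h.1), if_neg (fun h => hi h.1)]

-- B pass-1 (border) write condition and pass-2 write targets
abbrev CB1 (g : List (List Int)) (r c : Nat) : Prop :=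
  (r = 0 ∨ r = g.length - 1 ∨ c = 0 ∨ c = gcols g - 1) ∧ gval g r c ≠ 0

def targets (g : List (List Int)) (r c : Nat) : List (Int × Int) :=
  if gval g r c = 0
  then [((r:Int)-1,(c:Int)), ((r:Int)+1,(c:Int)), ((r:Int),(c:Int)-1), ((r:Int),(c:Int)+1)]
  else []

abbrev inbP (g : List (List Int)) (q : Int × Int) : Prop :=
  0 ≤ q.1 ∧ q.1 < (g.length:Int) ∧ 0 ≤ q.2 ∧ q.2 < ((gcols g):Int)

theorem pass1_char (g : List (List Int)) (i j : Nat) :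
    g2 ((List.range g.length).foldl (fun res r =>
      (List.range (gcols g)).foldl (fun res c =>
        if CB1 g r c then gset2 res r c 0 else res) res) g) i j
    = if i < g.length ∧ j < gcols g ∧ CB1 g i j
      then (g2 g i j).map (fun _ => 0) else g2 g i j := by
  have hmap : ∀ (init : List (List Int)) (r : Nat),
      (List.range (gcols g)).foldl (fun res c => if CB1 g r c then gset2 res r c 0 else res) init
      = ((List.range (gcols g)).map (fun c => (r, c))).foldl
          (fun res (p : Nat × Nat) => if CB1 g p.1 p.2 then gset2 res p.1 p.2 0 else res) init := by
    intro init r; rw [List.foldl_map]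
  rw [show (List.range g.length).foldl (fun res r => (List.range (gcols g)).foldl
        (fun res c => if CB1 g r c then gset2 res r c 0 else res) res) g
      = (List.range g.length).foldl (fun res r => ((List.range (gcols g)).map (fun c => (r, c))).foldl
        (fun res (p : Nat × Nat) => if CB1 g p.1 p.2 then gset2 res p.1 p.2 0 else res) res) g
    from PySem.List.foldl_congr_mem _ _ _ _ (fun acc r _ => hmap acc r)]
  rw [g2_foldl_fold2]
  have hiff : (∃ r ∈ List.range g.length, ∃ p ∈ (List.range (gcols g)).map (fun c => (r, c)),
        CB1 g p.1 p.2 ∧ p.1 = i ∧ p.2 = j) ↔ (i < g.length ∧ j < gcols g ∧ CB1 g i j) := by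
    constructor
    · rintro ⟨r, hr, p, hp, hC, h1, h2⟩
      rcases List.mem_map.mp hp with ⟨c, hc, rfl⟩
      cases h1; cases h2
      exact ⟨List.mem_range.mp hr, List.mem_range.mp hc, hC⟩
    · rintro ⟨hi, hj, hC⟩
      exact ⟨i, List.mem_range.mpr hi, (i, j),
        List.mem_map.mpr ⟨j, List.mem_range.mpr hj, rfl⟩, hC, rfl, rfl⟩
  simp only [hiff]

theorem pass2_char (g init : List (List Int)) (i j : Nat) :
    g2 ((List.range g.length).foldl (fun res r =>
      (List.range (gcols g)).foldl (fun res c =>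
        if gval g r c = 0 then
          [((r:Int)-1,(c:Int)), ((r:Int)+1,(c:Int)), ((r:Int),(c:Int)-1), ((r:Int),(c:Int)+1)].foldl
            (fun res q => if inbP g q then gset2 res q.1.toNat q.2.toNat 0 else res) res
        else res) res) init) i j
    = if i < g.length ∧ j < gcols g ∧ NZ g i j
      then (g2 init i j).map (fun _ => 0) else g2 init i j := by
  have hbody : ∀ (res : List (List Int)) (r c : Nat),
      (if gval g r c = 0 then
          [((r:Int)-1,(c:Int)), ((r:Int)+1,(c:Int)), ((r:Int),(c:Int)-1), ((r:Int),(c:Int)+1)].foldl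
            (fun res q => if inbP g q then gset2 res q.1.toNat q.2.toNat 0 else res) res
        else res)
      = (targets g r c).foldl (fun res q => if inbP g q then gset2 res q.1.toNat q.2.toNat 0 else res) res := by
    intro res r c
    unfold targets
    split_ifs <;> rfl
  have hflat : ∀ (init : List (List Int)) (r : Nat),
      (List.range (gcols g)).foldl (fun res c =>
        (targets g r c).foldl (fun res q => if inbP g q then gset2 res q.1.toNat q.2.toNat 0 else res) res) init
      = ((List.range (gcols g)).flatMap (targets g r)).foldl
          (fun res q => if inbP g q then gset2 res q.1.toNat q.2.toNat 0 else res) init := by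
    intro init r; rw [List.foldl_flatMap]
  rw [show (List.range g.length).foldl (fun res r =>
      (List.range (gcols g)).foldl (fun res c =>
        if gval g r c = 0 then
          [((r:Int)-1,(c:Int)), ((r:Int)+1,(c:Int)), ((r:Int),(c:Int)-1), ((r:Int),(c:Int)+1)].foldl
            (fun res q => if inbP g q then gset2 res q.1.toNat q.2.toNat 0 else res) res
        else res) res) init
    = (List.range g.length).foldl (fun res r =>
        ((List.range (gcols g)).flatMap (targets g r)).foldl
          (fun res q => if inbP g q then gset2 res q.1.toNat q.2.toNat 0 else res) res) init
    from PySem.List.foldl_congr_mem _ _ _ _ (fun acc r _ => by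
      rw [← hflat acc r]
      exact PySem.List.foldl_congr_mem _ _ _ _ (fun acc' c _ => hbody acc' r c))]
  rw [g2_foldl_fold2]
  have hiff : (∃ r ∈ List.range g.length, ∃ q ∈ (List.range (gcols g)).flatMap (targets g r),
        inbP g q ∧ q.1.toNat = i ∧ q.2.toNat = j) ↔ (i < g.length ∧ j < gcols g ∧ NZ g i j) := by
    constructor
    · rintro ⟨r, hr, q, hq, hinb, h1, h2⟩
      have hr' : r < g.length := List.mem_range.mp hr
      rcases List.mem_flatMap.mp hq with ⟨c, hc, hqt⟩
      have hc' : c < gcols g := List.mem_range.mp hc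
      unfold targets at hqt
      by_cases h0 : gval g r c = 0
      · rw [if_pos h0] at hqt
        obtain ⟨q1, q2⟩ := q
        obtain ⟨b1, b2, b3, b4⟩ := hinb
        simp only [List.mem_cons, List.not_mem_nil, or_false, Prod.mk.injEq] at hqt
        rcases hqt with ⟨e1, e2⟩ | ⟨e1, e2⟩ | ⟨e1, e2⟩ | ⟨e1, e2⟩ <;> subst e1 <;> subst e2 <;>
          refine ⟨by omega, by omega, ?_⟩
        · refine Or.inr (Or.inl ⟨by omega, ?_⟩)
          have er : i + 1 = r := by omega
          have ec : j = c := by omega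
          rw [er, ec]; exact h0
        · refine Or.inl ⟨by omega, ?_⟩
          have er : i - 1 = r := by omega
          have ec : j = c := by omega
          rw [er, ec]; exact h0
        · refine Or.inr (Or.inr (Or.inr ⟨by omega, ?_⟩))
          have er : i = r := by omega
          have ec : j + 1 = c := by omega
          rw [er, ec]; exact h0
        · refine Or.inr (Or.inr (Or.inl ⟨by omega, ?_⟩))
          have er : i = r := by omega
          have ec : j - 1 = c := by omega
          rw [er, ec]; exact h0
      · rw [if_neg h0] at hqt
        exact absurd hqt (List.not_mem_nil)
    · rintro ⟨hi, hj, hnz⟩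
      rcases hnz with ⟨h1, h0⟩ | ⟨h1, h0⟩ | ⟨h1, h0⟩ | ⟨h1, h0⟩
      · refine ⟨i - 1, List.mem_range.mpr (by omega), ((↑(i-1) : Int) + 1, (j : Int)),
          List.mem_flatMap.mpr ⟨j, List.mem_range.mpr hj, ?_⟩, ⟨by omega, by omega, by omega, by omega⟩,
          by omega, by omega⟩
        unfold targets
        rw [if_pos h0]
        exact List.mem_cons_of_mem _ (List.mem_cons_self ..)
      · refine ⟨i + 1, List.mem_range.mpr (by omega), ((↑(i+1) : Int) - 1, (j : Int)),
          List.mem_flatMap.mpr ⟨j, List.mem_range.mpr hj, ?_⟩, ⟨by omega, by omega, by omega, by omega⟩,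
          by omega, by omega⟩
        unfold targets
        rw [if_pos h0]
        exact List.mem_cons_self ..
      · refine ⟨i, List.mem_range.mpr hi, ((i : Int), (↑(j-1) : Int) + 1),
          List.mem_flatMap.mpr ⟨j - 1, List.mem_range.mpr (by omega), ?_⟩, ⟨by omega, by omega, by omega, by omega⟩,
          by omega, by omega⟩
        unfold targets
        rw [if_pos h0]
        exact List.mem_cons_of_mem _ (List.mem_cons_of_mem _ (List.mem_cons_of_mem _ (List.mem_cons_self ..)))
      · refine ⟨i, List.mem_range.mpr hi, ((i : Int), (↑(j+1) : Int) - 1),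
          List.mem_flatMap.mpr ⟨j + 1, List.mem_range.mpr h1, ?_⟩, ⟨by omega, by omega, by omega, by omega⟩,
          by omega, by omega⟩
        unfold targets
        rw [if_pos h0]
        exact List.mem_cons_of_mem _ (List.mem_cons_of_mem _ (List.mem_cons_self ..))
  simp only [hiff]

theorem g2_gerode_alt (g : List (List Int)) (i j : Nat) :
    g2 (gerode_alt g) i j =
      if i < g.length ∧ j < gcols g ∧ ((BorderC g i j ∧ gval g i j ≠ 0) ∨ NZ g i j)
      then (g2 g i j).map (fun _ => 0) else g2 g i j := by
  unfold gerode_alt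
  dsimp only
  rw [clone_eq, pass2_char, pass1_char]
  by_cases hi : i < g.length
  · by_cases hj : j < gcols g
    · by_cases hb : CB1 g i j
      · rw [if_pos (show i < g.length ∧ j < gcols g ∧ CB1 g i j from ⟨hi, hj, hb⟩)]
        by_cases hnz : NZ g i j
        · rw [if_pos (show i < g.length ∧ j < gcols g ∧ NZ g i j from ⟨hi, hj, hnz⟩),
            if_pos (show i < g.length ∧ j < gcols g ∧ ((BorderC g i j ∧ gval g i j ≠ 0) ∨ NZ g i j)
              from ⟨hi, hj, Or.inl hb⟩)]
          cases g2 g i j <;> rfl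
        · rw [if_neg (show ¬(i < g.length ∧ j < gcols g ∧ NZ g i j) from fun h => hnz h.2.2),
            if_pos (show i < g.length ∧ j < gcols g ∧ ((BorderC g i j ∧ gval g i j ≠ 0) ∨ NZ g i j)
              from ⟨hi, hj, Or.inl hb⟩)]
      · rw [if_neg (show ¬(i < g.length ∧ j < gcols g ∧ CB1 g i j) from fun h => hb h.2.2)]
        by_cases hnz : NZ g i j
        · rw [if_pos (show i < g.length ∧ j < gcols g ∧ NZ g i j from ⟨hi, hj, hnz⟩),
            if_pos (show i < g.length ∧ j < gcols g ∧ ((BorderC g i j ∧ gval g i j ≠ 0) ∨ NZ g i j)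
              from ⟨hi, hj, Or.inr hnz⟩)]
        · rw [if_neg (show ¬(i < g.length ∧ j < gcols g ∧ NZ g i j) from fun h => hnz h.2.2),
            if_neg (show ¬(i < g.length ∧ j < gcols g ∧ ((BorderC g i j ∧ gval g i j ≠ 0) ∨ NZ g i j))
              from fun h => h.2.2.elim (fun h' => hb h') hnz)]
    · rw [if_neg (show ¬(i < g.length ∧ j < gcols g ∧ NZ g i j) from fun h => hj h.2.1),
        if_neg (show ¬(i < g.length ∧ j < gcols g ∧ CB1 g i j) from fun h => hj h.2.1),
        if_neg (show ¬(i < g.length ∧ j < gcols g ∧ ((BorderC g i j ∧ gval g i j ≠ 0) ∨ NZ g i j))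
          from fun h => hj h.2.1)]
  · rw [if_neg (show ¬(i < g.length ∧ j < gcols g ∧ NZ g i j) from fun h => hi h.1),
      if_neg (show ¬(i < g.length ∧ j < gcols g ∧ CB1 g i j) from fun h => hi h.1),
      if_neg (show ¬(i < g.length ∧ j < gcols g ∧ ((BorderC g i j ∧ gval g i j ≠ 0) ∨ NZ g i j))
        from fun h => hi h.1)]

theorem gshape_gerode (g : List (List Int)) : gshape (gerode g) = gshape g := by
  rw [gerode_eq_setif]
  refine foldl_pres gshape _ (fun acc r => ?_) _ _
  refine foldl_pres gshape _ (fun acc' c => ?_) _ _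
  split_ifs
  · exact gshape_gset2 ..
  · rfl

theorem gshape_gerode_alt (g : List (List Int)) : gshape (gerode_alt g) = gshape g := by
  unfold gerode_alt
  dsimp only
  rw [clone_eq]
  have h1 : ∀ (m : List (List Int)), gshape ((List.range g.length).foldl (fun res r =>
      (List.range (gcols g)).foldl (fun res c =>
        if CB1 g r c then gset2 res r c 0 else res) res) m) = gshape m := by
    intro m
    refine foldl_pres gshape _ (fun acc r => ?_) _ _
    refine foldl_pres gshape _ (fun acc' c => ?_) _ _
    split_ifs
    · exact gshape_gset2 ..
    · rfl
  rw [← h1 g]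
  refine foldl_pres gshape _ (fun acc r => ?_) _ _
  refine foldl_pres gshape _ (fun acc' c => ?_) _ _
  split_ifs
  · refine foldl_pres gshape _ (fun acc'' q => ?_) _ _
    split_ifs
    · exact gshape_gset2 ..
    · rfl
  · rfl

theorem eq_of_gshape_g2 (a b : List (List Int))
    (hs : gshape a = gshape b) (h : ∀ i j, g2 a i j = g2 b i j) : a = b := by
  apply List.ext_getElem?
  intro i
  have hlen : a.length = b.length := by
    have := congrArg List.length hs; simpa [gshape] using this
  rcases Nat.lt_or_ge i a.length with hi | hi
  · have hib : i < b.length := hlen ▸ hi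
    rw [List.getElem?_eq_getElem hi, List.getElem?_eq_getElem hib]
    congr 1
    apply List.ext_getElem?
    intro j
    have := h i j
    rwa [g2, g2, List.getElem?_eq_getElem hi, List.getElem?_eq_getElem hib] at this
  · rw [List.getElem?_eq_none hi, List.getElem?_eq_none (hlen ▸ hi)]

-- ===== VERDICT (by name: the statement is the Claim_ definition above) =====
theorem gerode_spec : Claim_equal_gerode := by
  intro g _ hpre
  unfold Spec_gerode
  apply eq_of_gshape_g2
  · rw [gshape_gerode, gshape_gerode_alt]
  intro i j
  rw [g2_gerode, g2_gerode_alt]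
  by_cases hi : i < g.length
  · by_cases hj : j < gcols g
    · have hval : g2 g i j = some (gval g i j) := by
        have hmem : g[i] ∈ g := List.getElem_mem hi
        have hlen : gcols g ≤ g[i].length := by
          rw [gcols_eq]; exact hpre _ hmem
        have hj' : j < g[i].length := lt_of_lt_of_le hj hlen
        simp [g2, gval, List.getElem?_eq_getElem hi, List.getElem?_eq_getElem hj',
          List.getD_eq_getElem?_getD]
      by_cases hv : gval g i j = 0
      · have hmap : (g2 g i j).map (fun _ => (0:Int)) = g2 g i j := by
          rw [hval, hv]; rfl
        rw [hmap]
        split_ifs <;> rfl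
      · have hcond : (gval g i j ≠ 0 ∧ (BorderC g i j ∨ NZ g i j))
            ↔ ((BorderC g i j ∧ gval g i j ≠ 0) ∨ NZ g i j) := by
          constructor
          · rintro ⟨h1, h2 | h2⟩
            · exact Or.inl ⟨h2, h1⟩
            · exact Or.inr h2
          · rintro (⟨h1, h2⟩ | h1)
            · exact ⟨h2, Or.inl h1⟩
            · exact ⟨hv, Or.inr h1⟩
        by_cases hc : gval g i j ≠ 0 ∧ (BorderC g i j ∨ NZ g i j)
        · rw [if_pos ⟨hi, hj, hc⟩, if_pos ⟨hi, hj, hcond.mp hc⟩]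
        · rw [if_neg (fun h => hc h.2.2), if_neg (fun h => hc (hcond.mpr h.2.2))]
    · rw [if_neg (fun h => hj h.2.1), if_neg (fun h => hj h.2.1)]
  · rw [if_neg (fun h => hi h.1), if_neg (fun h => hi h.1)]
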